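-- pv_equiv track=rewrite | github.com/Uber-Career-Prep-2023/Uber-Career-Prep-Homework-Carlos-Guzman | Assignment-1/04_BackspaceStringCompare.py | process_keystrokes
-- ===== SOURCE A (Python) =====
-- def process_keystrokes(s):
--     result = ""
--     for c in s:
--         if c == "#":
--             if len(result) > 0:
--                 result = result[:-1]
--         else:
--             result += c
--     return result
-- ===== SOURCE B (Python) =====
-- def process_keystrokes(s):
--     out = []
--     skip = 0
--     for c in reversed(s):
--         if c == '#':
--             skip += 1
--         elif skip > 0:
--             skip -= 1
--         else:
--             out.append(c)
--     return ''.join(reversed(out))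
-- ===== Notes on version B (the rewrite author's own statement) =====
-- stated objective: alternative
-- what changed: Replaces the forward loop that rebuilds the string via slicing (result[:-1] / +=) with a single right-to-left scan that counts pending backspaces and collects surviving characters in a list joined once; not measurably faster in CPython at tested sizes.
import Mathlib
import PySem

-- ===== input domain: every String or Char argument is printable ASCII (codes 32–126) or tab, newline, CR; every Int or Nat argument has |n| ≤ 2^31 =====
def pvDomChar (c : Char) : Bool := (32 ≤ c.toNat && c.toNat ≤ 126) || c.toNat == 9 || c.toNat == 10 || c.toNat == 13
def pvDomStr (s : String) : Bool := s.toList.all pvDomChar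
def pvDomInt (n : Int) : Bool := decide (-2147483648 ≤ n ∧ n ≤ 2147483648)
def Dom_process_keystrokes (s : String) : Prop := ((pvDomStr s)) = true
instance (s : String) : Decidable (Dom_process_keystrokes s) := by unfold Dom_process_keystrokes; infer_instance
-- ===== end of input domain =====

-- B replaces A's forward loop with per-'#' string slicing by a single right-to-left scan
-- counting pending backspaces and joining once; objective: alternative algorithm, same measured cost.

-- ===== PORT A =====
-- A's loop: result = "" ; for c in s: if c == '#': drop last if nonempty else append c.
-- result is modelled as a List Char; result[:-1] = dropLast, result += c = append.
def pvAStep (r : List Char) (c : Char) : List Char :=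
  if c = '#' then (if r.length > 0 then r.dropLast else r) else r ++ [c]

def process_keystrokes (s : String) : String :=
  String.mk (s.toList.foldl pvAStep [])

-- ===== PORT B =====
-- B's loop over reversed(s): '#' increments skip; else skip > 0 decrements; else append c to out.
-- Returns ''.join(reversed(out)).
def pvBStep (st : Nat × List Char) (c : Char) : Nat × List Char :=
  if c = '#' then (st.1 + 1, st.2)
  else if st.1 > 0 then (st.1 - 1, st.2)
  else (st.1, st.2 ++ [c])

def process_keystrokes_alt (s : String) : String :=
  String.mk ((s.toList.reverse.foldl pvBStep (0, [])).2.reverse)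

-- ===== PRECONDITION & SPEC =====
def Spec_process_keystrokes (s : String) (out : String) : Prop := out = process_keystrokes_alt s
instance (s : String) (out : String) : Decidable (Spec_process_keystrokes s out) := by unfold Spec_process_keystrokes; infer_instance

-- ===== CLAIM (what is proved, stated in full; the proofs are below) =====
def Claim_equal_process_keystrokes : Prop := ∀ (s : String), Dom_process_keystrokes s → Spec_process_keystrokes s (process_keystrokes s)

-- ===== LEMMAS AND PROOFS =====

-- B's reverse-foldl as a foldr on the original list.
def pvG (l : List Char) : Nat × List Char := l.foldr (fun c st => pvBStep st c) (0, [])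

lemma pvG_eq (l : List Char) : l.reverse.foldl pvBStep (0, []) = pvG l := by
  simp [pvG, List.foldl_reverse]

-- Main invariant: running A's loop from state r on l yields r truncated by the
-- pending-backspace count of l, followed by the surviving characters of l.
lemma pvMain (l : List Char) : ∀ r : List Char,
    l.foldl pvAStep r = r.take (r.length - (pvG l).1) ++ (pvG l).2.reverse := by
  induction l with
  | nil => intro r; simp [pvG]
  | cons c l ih =>
    intro r
    have hrec : pvG (c :: l) = pvBStep (pvG l) c := rfl
    rw [List.foldl_cons, ih (pvAStep r c), hrec]
    by_cases hc : c = '#'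
    · subst hc
      simp only [pvAStep, pvBStep, reduceIte]
      cases r with
      | nil => simp
      | cons a t =>
        simp only [List.length_cons, if_pos (Nat.succ_pos t.length)]
        have h1 : (a :: t).dropLast.length = t.length := by simp
        rw [h1]
        congr 1
        have : (a :: t).dropLast.take (t.length - (pvG l).1)
            = (a :: t).take (t.length - (pvG l).1) := by
          rw [List.dropLast_eq_take, List.take_take]
          congr 1
          simp only [List.length_cons, Nat.add_sub_cancel]
          omega
        rw [this]
        congr 1
        omega
    · rcases h0 : (pvG l).1 with _ | k
      · simp only [pvAStep, pvBStep, if_neg hc, h0]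
        simp only [Nat.lt_irrefl, reduceIte]
        have : (r ++ [c]).take (r.length + 1 - 0) = r ++ [c] := by
          simp
        simp only [List.length_append, List.length_singleton]
        rw [this]
        simp
      · simp only [pvAStep, pvBStep, if_neg hc, h0, Nat.succ_sub_one,
          Nat.succ_pos, if_pos]
        have hle : r.length + 1 - (k + 1) ≤ r.length := by omega
        rw [List.length_append, List.length_singleton,
          List.take_append_of_le_length hle]
        congr 2
        omega

-- ===== VERDICT (by name: the statement is the Claim_ definition above) =====
theorem process_keystrokes_spec : Claim_equal_process_keystrokes := by
  intro s _
  unfold Spec_process_keystrokes process_keystrokes process_keystrokes_alt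
  rw [pvG_eq, pvMain]
  simp
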